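-- pv_equiv track=rewrite | github.com/archit-galent/Prompt_POC | test_repo/utils/helpers.py | bar
-- ===== SOURCE A (Python) =====
-- def bar(input_string: str, max_length: int = 100) -> str:
--     """
--     Process and sanitize input strings for safe usage.
--
--     Args:
--         input_string: String to process
--         max_length: Maximum allowed length
--
--     Returns:
--         Processed and sanitized string
--     """
--     if not isinstance(input_string, str):
--         input_string = str(input_string)
--
--     # Remove dangerous characters
--     dangerous_chars = ['<', '>', '&', '"', "'", '\x00']
--     sanitized = input_string
--
--     for char in dangerous_chars:
--         sanitized = sanitized.replace(char, '')
--
--     # Truncate if too long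
--     if len(sanitized) > max_length:
--         sanitized = sanitized[:max_length] + "..."
--
--     return sanitized.strip()
-- ===== SOURCE B (Python) =====
-- def bar(input_string: str, max_length: int = 100) -> str:
--     """Sanitize a string: drop dangerous characters in one pass, truncate, strip."""
--     if not isinstance(input_string, str):
--         input_string = str(input_string)
--     bad = {'<', '>', '&', '"', "'", '\x00'}
--     sanitized = ''.join(c for c in input_string if c not in bad)
--     if len(sanitized) > max_length:
--         sanitized = sanitized[:max_length] + "..."
--     return sanitized.strip()
-- ===== Notes on version B (the rewrite author's own statement) =====
-- stated objective: idiomatic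
-- what changed: Six sequential .replace scans over the whole string are replaced by one single-pass join-of-a-filter comprehension against a set of dangerous characters; truncation and strip are unchanged.
import Mathlib
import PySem

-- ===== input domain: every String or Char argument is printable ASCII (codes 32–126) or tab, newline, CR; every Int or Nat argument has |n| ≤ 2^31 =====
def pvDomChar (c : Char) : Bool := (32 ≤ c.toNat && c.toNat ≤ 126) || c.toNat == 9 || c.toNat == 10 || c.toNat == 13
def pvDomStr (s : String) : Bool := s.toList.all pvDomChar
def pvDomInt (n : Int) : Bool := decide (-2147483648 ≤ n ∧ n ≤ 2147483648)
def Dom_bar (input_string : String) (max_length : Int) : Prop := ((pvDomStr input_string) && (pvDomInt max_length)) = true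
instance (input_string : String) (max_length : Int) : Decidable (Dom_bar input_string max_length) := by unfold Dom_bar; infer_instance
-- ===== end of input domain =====

-- B changes A's six sequential .replace scans into one single-pass filter against a set of
-- dangerous characters (idiomatic, same result); truncation and strip are identical.

-- ===== PORT A =====
-- A's work on the string's characters (A loops over the dangerous-char list doing .replace)
def barChars (s : List Char) (max_length : Int) : List Char :=
  let sanitized := s
  let sanitized := PySem.Chars.replace sanitized ['<'] []
  let sanitized := PySem.Chars.replace sanitized ['>'] []
  let sanitized := PySem.Chars.replace sanitized ['&'] []
  let sanitized := PySem.Chars.replace sanitized ['"'] []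
  let sanitized := PySem.Chars.replace sanitized ['\''] []
  let sanitized := PySem.Chars.replace sanitized ['\x00'] []
  let sanitized :=
    if max_length < (sanitized.length : Int) then
      PySem.Chars.slice sanitized none (some max_length) ++ "...".toList
    else sanitized
  PySem.Chars.strip sanitized

def bar (input_string : String) (max_length : Int) : String :=
  String.ofList (barChars input_string.toList max_length)

-- ===== PORT B =====
def badChars : List Char := ['<', '>', '&', '"', '\'', '\x00']

-- B's work on the string's characters (single-pass filter against the set)
def barAltChars (s : List Char) (max_length : Int) : List Char :=
  let sanitized := s.filter (fun c => !(badChars.contains c))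
  let sanitized :=
    if max_length < (sanitized.length : Int) then
      PySem.Chars.slice sanitized none (some max_length) ++ "...".toList
    else sanitized
  PySem.Chars.strip sanitized

def bar_alt (input_string : String) (max_length : Int) : String :=
  String.ofList (barAltChars input_string.toList max_length)

-- ===== PRECONDITION & SPEC =====
def Spec_bar (input_string : String) (max_length : Int) (out : String) : Prop := out = bar_alt input_string max_length
instance (input_string : String) (max_length : Int) (out : String) : Decidable (Spec_bar input_string max_length out) := by unfold Spec_bar; infer_instance

-- ===== CLAIM (what is proved, stated in full; the proofs are below) =====
def Claim_equal_bar : Prop := ∀ (input_string : String) (max_length : Int), Dom_bar input_string max_length → Spec_bar input_string max_length (bar input_string max_length)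

-- ===== LEMMAS AND PROOFS =====

-- replacing one character by the empty string is filtering it out
lemma replace_go_single (c : Char) : ∀ (fuel : Nat) (l acc : List Char), l.length ≤ fuel →
    PySem.Chars.replace.go [c] [] fuel l acc = acc.reverse ++ l.filter (fun x => x != c) := by
  intro fuel
  induction fuel with
  | zero =>
      intro l acc h
      have : l = [] := List.eq_nil_of_length_eq_zero (Nat.le_zero.mp h)
      subst this
      simp [PySem.Chars.replace.go]
  | succ n ih =>
      intro l acc h
      cases l with
      | nil => simp [PySem.Chars.replace.go]
      | cons x t =>
          simp only [PySem.Chars.replace.go]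
          by_cases hx : x = c
          · subst hx
            simp only [List.isPrefixOf, beq_self_eq_true, Bool.true_and,              if_pos, List.length_cons, List.length_nil, List.drop_succ_cons, List.drop_zero,
              List.reverse_nil, List.nil_append]
            rw [ih t acc (by simpa using Nat.le_of_succ_le_succ h)]
            simp [List.filter]
          · rw [show List.isPrefixOf [c] (x :: t) = false by
              simp [List.isPrefixOf]
              exact fun hc => hx hc.symm]
            simp only [Bool.false_eq_true]
            rw [ih t _ (by simpa using Nat.le_of_succ_le_succ h)]
            have hb : (x != c) = true := by simp [hx]
            simp [List.filter, hb]

lemma replace_single (c : Char) (s : List Char) :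
    PySem.Chars.replace s [c] [] = s.filter (fun x => x != c) := by
  rw [PySem.Chars.replace]
  simp only [List.isEmpty, Bool.false_eq_true]
  rw [replace_go_single c s.length s [] (le_refl _)]
  simp

lemma sanitize_eq (s : List Char) :
    PySem.Chars.replace (PySem.Chars.replace (PySem.Chars.replace (PySem.Chars.replace
      (PySem.Chars.replace (PySem.Chars.replace s ['<'] []) ['>'] []) ['&'] []) ['"'] [])
      ['\''] []) ['\x00'] [] = s.filter (fun c => !(badChars.contains c)) := by
  simp only [replace_single, List.filter_filter]
  apply List.filter_congr
  intro x _
  simp only [badChars, List.contains_cons, List.contains_nil, Bool.or_false,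
    Bool.not_or]
  cases h1 : (x == '<') <;> cases h2 : (x == '>') <;> cases h3 : (x == '&') <;>
    cases h4 : (x == '"') <;> cases h5 : (x == '\'') <;> cases h6 : (x == '\x00') <;>
    simp_all [bne]

-- ===== VERDICT (by name: the statement is the Claim_ definition above) =====
theorem bar_spec : Claim_equal_bar := by
  intro input_string max_length _
  simp only [Spec_bar, bar, bar_alt, barChars, barAltChars, sanitize_eq]
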